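-- pv_equiv track=rewrite | github.com/SMIAO-FSCS/smiao | src/adapter_spos/util.py | remove_conflicting_zero_pairs
-- ===== SOURCE A (Python) =====
-- def remove_conflicting_zero_pairs(text_lines, code_lines, labels):
--     if not (len(text_lines) == len(code_lines) == len(labels)):
--         raise ValueError("All input lists must have the same length.")
--
--     # 创建一个字典来存储每个<query, code>对应的label
--     pair_to_label = {}
--
--     # 遍历所有样本
--     for text, code, label in zip(text_lines, code_lines, labels):
--         pair = (text, code)
--
--         # 如果这个pair已经存在于字典中
--         if pair in pair_to_label:
--             # 如果当前label为1且之前存储的label为0，则更新label为1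
--             if label == 1 and pair_to_label[pair] == 0:
--                 pair_to_label[pair] = 1
--         else:
--             # 如果pair不存在于字典中，直接添加
--             pair_to_label[pair] = label
--
--     # 现在pair_to_label包含了没有冲突的<query, code, label>
--     # 重新构建text_lines, code_lines, labels数组
--     new_text_lines = []
--     new_code_lines = []
--     new_labels = []
--
--     for pair, label in pair_to_label.items():
--         new_text_lines.append(pair[0])
--         new_code_lines.append(pair[1])
--         new_labels.append(label)
--
--     return new_text_lines, new_code_lines, new_labels
-- ===== SOURCE B (Python) =====
-- def remove_conflicting_zero_pairs(text_lines, code_lines, labels):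
--     if not (len(text_lines) == len(code_lines) == len(labels)):
--         raise ValueError("All input lists must have the same length.")
--
--     # Worklist algorithm: repeatedly take the first remaining sample, resolve its
--     # label by scanning the remaining tail for a label-1 duplicate (only an exact 0
--     # is upgraded), then drop every remaining occurrence of that pair.
--     new_text_lines = []
--     new_code_lines = []
--     new_labels = []
--     rest = list(zip(text_lines, code_lines, labels))
--     while rest:
--         text, code, label = rest[0]
--         tail = rest[1:]
--         if label == 0 and any(l2 == 1 for t2, c2, l2 in tail if (t2, c2) == (text, code)):
--             label = 1
--         new_text_lines.append(text)
--         new_code_lines.append(code)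
--         new_labels.append(label)
--         rest = [(t2, c2, l2) for (t2, c2, l2) in tail if (t2, c2) != (text, code)]
--     return new_text_lines, new_code_lines, new_labels
-- ===== Notes on version B (the rewrite author's own statement) =====
-- stated objective: alternative
-- what changed: Replaces A's dict-based single pass (hash map with in-place label upgrades, then an items walk) by a dictionary-free worklist algorithm: repeatedly take the first remaining sample, resolve its label by scanning the remaining tail for a label-1 duplicate, and filter all its duplicates out of the worklist; O(n^2) instead of O(n) but no auxiliary dict.
import Mathlib
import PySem

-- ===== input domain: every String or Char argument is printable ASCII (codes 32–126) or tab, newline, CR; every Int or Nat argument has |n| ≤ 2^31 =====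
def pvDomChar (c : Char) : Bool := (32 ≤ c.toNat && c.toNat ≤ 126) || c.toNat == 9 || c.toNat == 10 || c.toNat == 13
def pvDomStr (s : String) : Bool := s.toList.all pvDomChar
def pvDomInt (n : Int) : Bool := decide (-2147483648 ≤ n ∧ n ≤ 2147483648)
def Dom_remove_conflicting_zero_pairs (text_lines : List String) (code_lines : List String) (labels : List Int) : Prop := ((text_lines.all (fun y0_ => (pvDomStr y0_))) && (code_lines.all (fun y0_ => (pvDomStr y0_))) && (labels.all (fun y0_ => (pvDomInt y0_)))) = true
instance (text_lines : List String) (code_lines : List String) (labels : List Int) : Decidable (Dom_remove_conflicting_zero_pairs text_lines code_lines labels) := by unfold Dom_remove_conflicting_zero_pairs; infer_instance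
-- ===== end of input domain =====

-- B replaces A's dict-based pass (hash map with in-place label upgrades, then an
-- items walk) by a dictionary-free worklist algorithm: take the first remaining
-- sample, resolve its label against the remaining tail, filter its duplicates out;
-- O(n^2) instead of O(n), no auxiliary dict; same return value on equal-length inputs.

-- ===== PORT A =====
-- one iteration of A's first loop: dedupe into the dict, upgrading a stored 0 to 1
def pvAStep (d : PySem.Dict (String × String) Int) (x : (String × String) × Int) :
    PySem.Dict (String × String) Int :=
  if d.contains x.1 then
    if x.2 == 1 && d.getD x.1 0 == 0 then d.insert x.1 1 else d
  else
    d.insert x.1 x.2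

def remove_conflicting_zero_pairs (text_lines : List String) (code_lines : List String) (labels : List Int) : List String × List String × List Int :=
  let d := ((text_lines.zip code_lines).zip labels).foldl pvAStep PySem.Dict.empty
  d.items.foldl
    (fun acc pl => (acc.1 ++ [pl.1.1], acc.2.1 ++ [pl.1.2], acc.2.2 ++ [pl.2]))
    ([], [], [])

-- ===== PORT B =====
-- B's while loop over the worklist `rest`, with the three output accumulators
def pvBLoop : List ((String × String) × Int) →
    (List String × List String × List Int) → List String × List String × List Int
  | [], acc => acc
  | (p, label) :: tail, acc =>
    let lab := if label == 0 && tail.any (fun y => y.1 == p && y.2 == 1) then 1 else label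
    pvBLoop (tail.filter (fun y => !(y.1 == p)))
      (acc.1 ++ [p.1], acc.2.1 ++ [p.2], acc.2.2 ++ [lab])
termination_by xs _ => xs.length
decreasing_by
  simp only [List.length_unattach]
  exact Nat.lt_succ_of_le (le_trans (List.length_filter_le _ _) (by simp))

def remove_conflicting_zero_pairs_alt (text_lines : List String) (code_lines : List String) (labels : List Int) : List String × List String × List Int :=
  pvBLoop ((text_lines.zip code_lines).zip labels) ([], [], [])

-- ===== PRECONDITION & SPEC =====
-- Pre_ excludes exactly the inputs whose list lengths differ, where A raises ValueError.
def Pre_remove_conflicting_zero_pairs (text_lines : List String) (code_lines : List String) (labels : List Int) : Prop :=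
  text_lines.length = code_lines.length ∧ code_lines.length = labels.length
instance (text_lines : List String) (code_lines : List String) (labels : List Int) : Decidable (Pre_remove_conflicting_zero_pairs text_lines code_lines labels) := by unfold Pre_remove_conflicting_zero_pairs; infer_instance

def pvWitness_remove_conflicting_zero_pairs : List String × List String × List Int :=
  (["a", "a"], ["x", "x"], [0, 1])

def Spec_remove_conflicting_zero_pairs (text_lines : List String) (code_lines : List String) (labels : List Int) (out : List String × List String × List Int) : Prop := out = remove_conflicting_zero_pairs_alt text_lines code_lines labels
instance (text_lines : List String) (code_lines : List String) (labels : List Int) (out : List String × List String × List Int) : Decidable (Spec_remove_conflicting_zero_pairs text_lines code_lines labels out) := by unfold Spec_remove_conflicting_zero_pairs; infer_instance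

-- ===== CLAIM =====
def Claim_equal_remove_conflicting_zero_pairs : Prop := ∀ (text_lines : List String) (code_lines : List String) (labels : List Int), Dom_remove_conflicting_zero_pairs text_lines code_lines labels → Pre_remove_conflicting_zero_pairs text_lines code_lines labels → Spec_remove_conflicting_zero_pairs text_lines code_lines labels (remove_conflicting_zero_pairs text_lines code_lines labels)

-- ===== LEMMAS AND PROOFS =====

-- the deduped (pair, resolved label) list B's worklist loop emits
def pvSpec : List ((String × String) × Int) → List ((String × String) × Int)
  | [] => []
  | (p, label) :: tail =>
    (p, if label == 0 && tail.any (fun y => y.1 == p && y.2 == 1) then 1 else label) ::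
      pvSpec (tail.filter (fun y => !(y.1 == p)))
termination_by xs => xs.length
decreasing_by
  simp only [List.length_unattach]
  exact Nat.lt_succ_of_le (le_trans (List.length_filter_le _ _) (by simp))

-- how the remaining input upgrades one stored dict entry
def pvUpg (xs : List ((String × String) × Int)) (q : (String × String) × Int) :
    (String × String) × Int :=
  if q.2 == 0 && xs.any (fun y => y.1 == q.1 && y.2 == 1) then (q.1, 1) else q

lemma pvBLoop_eq (xs : List ((String × String) × Int))
    (acc : List String × List String × List Int) :
    pvBLoop xs acc
      = (acc.1 ++ (pvSpec xs).map (fun q => q.1.1),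
         acc.2.1 ++ (pvSpec xs).map (fun q => q.1.2),
         acc.2.2 ++ (pvSpec xs).map (fun q => q.2)) := by
  induction hn : xs.length using Nat.strong_induction_on generalizing xs acc with
  | _ n ih =>
    match xs with
    | [] => simp [pvBLoop, pvSpec]
    | (p, label) :: tail =>
      rw [pvBLoop, pvSpec]
      rw [ih (tail.filter (fun y => !(y.1 == p))).length
        (by subst hn; simpa using Nat.lt_succ_of_le (List.length_filter_le _ _)) _ _ rfl]
      simp

-- main invariant: A's left fold over the dict equals the stored entries upgraded by
-- the remaining input, followed by B's worklist result on the fresh part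
lemma pvMain (xs : List ((String × String) × Int)) (d : PySem.Dict (String × String) Int)
    (hnd : d.keys.Nodup) :
    (xs.foldl pvAStep d).items
      = d.items.map (pvUpg xs) ++ pvSpec (xs.filter (fun y => !(d.contains y.1))) := by
  induction xs generalizing d with
  | nil =>
    simp only [List.foldl_nil, List.filter_nil, pvSpec, List.append_nil]
    have hmap : List.map (pvUpg []) d.items = List.map (fun q => q) d.items :=
      List.map_congr_left (fun q _ => by simp [pvUpg])
    simp [hmap]
  | cons x xs ih =>
    obtain ⟨p, l⟩ := x
    simp only [List.foldl_cons, List.filter_cons]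
    by_cases hc : d.contains p = true
    · have hfilter : ∀ d' : PySem.Dict (String × String) Int,
        (∀ k, d'.contains k = d.contains k) →
        xs.filter (fun y => !(d'.contains y.1)) = xs.filter (fun y => !(d.contains y.1)) := by
        intro d' h; exact List.filter_congr (fun y _ => by rw [h])
      by_cases hu : (l == 1 && d.getD p 0 == 0) = true
      · -- upgrade in place
        have hv : d.getD p 0 = 0 := by
          simpa using (Bool.and_elim_right hu)
        have hl : l = 1 := by simpa using (Bool.and_elim_left hu)
        simp only [pvAStep, hc, hu, Bool.not_true, Bool.false_eq_true, reduceIte]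
        rw [ih _ (PySem.Dict.nodup_keys_insert d p 1 hnd)]
        have hfeq := hfilter (d.insert p 1) (fun k => by
          rw [PySem.Dict.contains_insert]
          by_cases hkp : (k == p) = true
          · have : k = p := by simpa using hkp
            simp [this, hc]
          · simp [hkp])
        rw [hfeq]
        congr 1
        rw [PySem.Dict.items_insert_of_contains _ _ hc, List.map_map]
        apply List.map_congr_left
        intro q hq
        by_cases hqp : (q.1 == p) = true
        · have hq1 : q.1 = p := by simpa using hqp
          have hq2 : q.2 = 0 := by
            have := PySem.Dict.getD_of_mem_items (d := d) (k := q.1) (v := q.2)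
              (d0 := 0) (by simpa using hq) hnd
            rw [hq1] at this; rw [← this, hv]
          simp only [Function.comp_apply, pvUpg, hq1, hq2]
          simp [hl]
        · simp only [Function.comp_apply, hqp, Bool.false_eq_true, if_false, pvUpg]
          have hne : (q.1 == p) = false := by simpa using hqp
          have hne2 : ¬ p = q.1 := fun hh => hqp (by simp [hh])
          simp [hne2]
      · -- no change to the dict
        have hu' : (l == 1 && d.getD p 0 == 0) = false := by simpa using hu
        simp only [pvAStep, hc, hu', Bool.not_true, Bool.false_eq_true, reduceIte]
        rw [ih _ hnd]
        congr 1
        apply List.map_congr_left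
        intro q hq
        by_cases hqp : (q.1 == p) = true
        · have hq1 : q.1 = p := by simpa using hqp
          have hq2 : q.2 = d.getD p 0 := by
            have := PySem.Dict.getD_of_mem_items (d := d) (k := q.1) (v := q.2)
              (d0 := 0) (by simpa using hq) hnd
            rw [hq1] at this; exact this.symm
          -- since not (l = 1 ∧ stored = 0), head of the list cannot trigger an upgrade
          unfold pvUpg
          simp only [List.any_cons]
          by_cases hq20 : q.2 = 0
          · have hlne : ¬ l = 1 := by
              intro hl1
              exact hu (by simp [hl1, ← hq2, hq20])
            simp [hq1, hq20, hlne]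
          · simp [hq20]
        · have hne : (q.1 == p) = false := by simpa using hqp
          have hne2 : ¬ p = q.1 := fun hh => hqp (by simp [hh])
          unfold pvUpg
          simp [hne2]
    · -- fresh pair appended
      have hc' : d.contains p = false := by simpa using hc
      simp only [pvAStep, hc', Bool.not_false, Bool.false_eq_true, reduceIte]
      have hnd' : (d.insert p l).keys.Nodup := PySem.Dict.nodup_keys_insert d p l hnd
      rw [ih _ hnd']
      rw [PySem.Dict.items_insert_of_not_contains _ _ hc', List.map_append]
      rw [pvSpec]
      have hany : (xs.filter (fun y => !(d.contains y.1))).any (fun y => y.1 == p && y.2 == 1)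
          = xs.any (fun y => y.1 == p && y.2 == 1) := by
        rw [List.any_filter]
        refine List.any_congr rfl (fun y => ?_)
        by_cases hyp : (y.1 == p) = true
        · have : y.1 = p := by simpa using hyp
          simp [this, hc']
        · have : (y.1 == p) = false := by simpa using hyp
          simp [this]
      have hff : (xs.filter (fun y => !(d.contains y.1))).filter (fun y => !(y.1 == p))
          = xs.filter (fun y => !((d.insert p l).contains y.1)) := by
        rw [List.filter_filter]
        apply List.filter_congr
        intro y _
        rw [PySem.Dict.contains_insert]
        cases hyp : (y.1 == p) <;> simp_all
      rw [hany, hff, List.append_assoc]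
      congr 1
      · apply List.map_congr_left
        intro q hq
        have hqk : q.1 ∈ d.keys := PySem.Dict.mem_keys_of_mem_items (d := d) hq
        have hqp : ¬ p = q.1 := by
          intro h
          exact absurd ((PySem.Dict.contains_iff_mem_keys d p).mpr (h ▸ hqk)) (by simp [hc'])
        unfold pvUpg
        simp [hqp]
      · simp only [List.map_cons]
        unfold pvUpg
        by_cases h0 : (l == 0 && xs.any (fun y => y.1 == p && y.2 == 1)) = true
        · simp [h0]
        · simp only [h0, Bool.false_eq_true, if_false]
          cases h : (l == 0 && xs.any (fun y => y.1 == p && y.2 == 1)) <;> simp_all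

-- A's second loop just unzips the items list into the three accumulators
lemma pvBuild (L : List ((String × String) × Int))
    (acc : List String × List String × List Int) :
    L.foldl (fun acc pl => (acc.1 ++ [pl.1.1], acc.2.1 ++ [pl.1.2], acc.2.2 ++ [pl.2])) acc
      = (acc.1 ++ L.map (fun q => q.1.1), acc.2.1 ++ L.map (fun q => q.1.2),
         acc.2.2 ++ L.map (fun q => q.2)) := by
  induction L generalizing acc with
  | nil => simp
  | cons x xs ih => simp [ih]

-- ===== VERDICT =====
theorem remove_conflicting_zero_pairs_spec : Claim_equal_remove_conflicting_zero_pairs := by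
  intro t c l _ _
  unfold Spec_remove_conflicting_zero_pairs
  unfold remove_conflicting_zero_pairs remove_conflicting_zero_pairs_alt
  rw [pvBuild, pvBLoop_eq]
  have h := pvMain ((t.zip c).zip l)
    (PySem.Dict.empty : PySem.Dict (String × String) Int)
    (by simp)
  have hfilt : ((t.zip c).zip l).filter
      (fun y => !((PySem.Dict.empty : PySem.Dict (String × String) Int).contains y.1))
      = (t.zip c).zip l := by
    apply List.filter_eq_self.mpr
    intro y _
    simp [PySem.Dict.contains_empty]
  rw [hfilt] at h
  have hemp : (PySem.Dict.empty : PySem.Dict (String × String) Int).items = [] := rfl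
  rw [hemp, List.map_nil, List.nil_append] at h
  rw [h]
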